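-- pv_equiv track=rewrite | github.com/smartypants99/RSI | src/trainer/growth.py | layer_mapping
-- ===== SOURCE A (Python) =====
-- def layer_mapping(teacher_num_layers: int, student_num_layers: int) -> list[int]:
--     """Return a list[int] of length `student_num_layers` where entry i is
--     the teacher-layer index to initialise student layer i from.
--
--     Interleaves source layers so duplicated copies live adjacent to their
--     original — the inductive bias most papers (LiGO, Staged-Training) found
--     useful vs naïve stacking.
--     """
--     if student_num_layers <= teacher_num_layers:
--         raise ValueError(
--             f"student_num_layers ({student_num_layers}) must be > "
--             f"teacher ({teacher_num_layers})"
--         )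
--     # For each student slot i in [0, S), pick teacher layer floor(i * T / S).
--     # This distributes the T teacher layers across S student slots, with
--     # contiguous blocks of student slots sharing a teacher source.
--     return [
--         min(teacher_num_layers - 1, (i * teacher_num_layers) // student_num_layers)
--         for i in range(student_num_layers)
--     ]
-- ===== SOURCE B (Python) =====
-- def layer_mapping(teacher_num_layers: int, student_num_layers: int) -> list[int]:
--     """Walk the student slots once, carrying the current teacher index and
--     advancing it whenever its block of slots is exhausted (two-pointer merge,
--     no per-slot division), clamped to the last teacher layer."""
--     if student_num_layers <= teacher_num_layers:
--         raise ValueError(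
--             f"student_num_layers ({student_num_layers}) must be > "
--             f"teacher ({teacher_num_layers})"
--         )
--     T, S = teacher_num_layers, student_num_layers
--     mapping = []
--     t = 0
--     for i in range(S):
--         if (t + 1) * S <= i * T:
--             t += 1
--         mapping.append(min(T - 1, t))
--     return mapping
-- ===== Notes on version B (the rewrite author's own statement) =====
-- stated objective: alternative
-- what changed: B replaces A's per-slot closed form min(T-1, i*T//S) by a single two-pointer sweep that carries the current teacher index and advances it when its block of student slots is exhausted, using only comparisons and multiplications (no division).
import Mathlib
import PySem

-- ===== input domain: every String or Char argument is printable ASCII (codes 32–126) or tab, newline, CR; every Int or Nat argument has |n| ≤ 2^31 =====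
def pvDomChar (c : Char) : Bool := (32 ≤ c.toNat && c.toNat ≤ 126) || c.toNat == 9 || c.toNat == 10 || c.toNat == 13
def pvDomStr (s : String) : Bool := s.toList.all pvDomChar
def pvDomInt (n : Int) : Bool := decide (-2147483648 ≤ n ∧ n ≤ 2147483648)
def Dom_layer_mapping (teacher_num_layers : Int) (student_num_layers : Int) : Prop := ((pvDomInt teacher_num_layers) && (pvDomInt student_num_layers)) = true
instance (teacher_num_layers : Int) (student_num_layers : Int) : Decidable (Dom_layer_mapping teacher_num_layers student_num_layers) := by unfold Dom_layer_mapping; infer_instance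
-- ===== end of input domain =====

-- B replaces A's per-slot division formula by a two-pointer sweep carrying the current
-- teacher index (advanced when its block of slots is exhausted); objective: alternative.

-- ===== PORT A =====
def layer_mapping (teacher_num_layers : Int) (student_num_layers : Int) : List Int :=
  if student_num_layers ≤ teacher_num_layers then []  -- Python A raises ValueError here (excluded by Pre_)
  else
    (PySem.List.pyRange 0 student_num_layers 1).map
      (fun i => min (teacher_num_layers - 1)
        (PySem.Int.floordiv (i * teacher_num_layers) student_num_layers))

-- ===== PORT B =====
def layer_mapping_alt (teacher_num_layers : Int) (student_num_layers : Int) : List Int :=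
  if student_num_layers ≤ teacher_num_layers then []  -- Python B raises ValueError here (excluded by Pre_)
  else
    ((PySem.List.pyRange 0 student_num_layers 1).foldl
      (fun st i =>
        let t := if (st.2 + 1) * student_num_layers ≤ i * teacher_num_layers then st.2 + 1 else st.2
        (st.1 ++ [min (teacher_num_layers - 1) t], t))
      ([], 0)).1

-- ===== PRECONDITION & SPEC =====
-- Pre_ excludes exactly student_num_layers ≤ teacher_num_layers, where Python A raises ValueError.
def Pre_layer_mapping (teacher_num_layers : Int) (student_num_layers : Int) : Prop :=
  teacher_num_layers < student_num_layers
instance (teacher_num_layers : Int) (student_num_layers : Int) : Decidable (Pre_layer_mapping teacher_num_layers student_num_layers) := by unfold Pre_layer_mapping; infer_instance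
def pvWitness_layer_mapping : Int × Int := (2, 5)
def Spec_layer_mapping (teacher_num_layers : Int) (student_num_layers : Int) (out : List Int) : Prop := out = layer_mapping_alt teacher_num_layers student_num_layers
instance (teacher_num_layers : Int) (student_num_layers : Int) (out : List Int) : Decidable (Spec_layer_mapping teacher_num_layers student_num_layers out) := by unfold Spec_layer_mapping; infer_instance

-- ===== CLAIM (what is proved, stated in full; the proofs are below) =====
def Claim_equal_layer_mapping : Prop := ∀ (teacher_num_layers : Int) (student_num_layers : Int), Dom_layer_mapping teacher_num_layers student_num_layers → Pre_layer_mapping teacher_num_layers student_num_layers → Spec_layer_mapping teacher_num_layers student_num_layers (layer_mapping teacher_num_layers student_num_layers)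

-- ===== LEMMAS AND PROOFS =====

-- the teacher index held by B's sweep after k iterations
def pvT (T S : Int) (k : Nat) : Int :=
  if k = 0 then 0 else max 0 (PySem.Int.floordiv (((k : Int) - 1) * T) S)

lemma pvFd_bracket (a b : Int) (hb : 0 < b) :
    (PySem.Int.floordiv a b) * b ≤ a ∧ a < (PySem.Int.floordiv a b + 1) * b :=
  (PySem.Int.floordiv_eq_iff_of_pos hb).mp rfl

-- for a non-positive teacher count the quotient is never positive
lemma pvFd_nonpos (T S m : Int) (hS : 0 < S) (hT : T ≤ 0) (hm : 0 ≤ m) :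
    PySem.Int.floordiv (m * T) S ≤ 0 := by
  have h := pvFd_bracket (m * T) S hS
  nlinarith [h.1]

-- for a positive teacher count the quotient is never negative
lemma pvFd_nonneg (T S m : Int) (hS : 0 < S) (hT : 0 < T) (hm : 0 ≤ m) :
    0 ≤ PySem.Int.floordiv (m * T) S := by
  have h := pvFd_bracket (m * T) S hS
  nlinarith [h.2]

-- clamping at T-1 erases the max with 0: B's appended entry equals A's per-slot formula
lemma pvVal (T S : Int) (k : Nat) (hkS : (k : Int) < S) :
    min (T - 1) (max 0 (PySem.Int.floordiv ((k : Int) * T) S))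
      = min (T - 1) (PySem.Int.floordiv ((k : Int) * T) S) := by
  have hk0 : (0 : Int) ≤ (k : Int) := Int.natCast_nonneg k
  have hS : 0 < S := by omega
  by_cases hT : 0 < T
  · rw [max_eq_right (pvFd_nonneg T S (k : Int) hS hT hk0)]
  · replace hT : T ≤ 0 := by omega
    have h1 : PySem.Int.floordiv ((k : Int) * T) S ≤ 0 := pvFd_nonpos T S _ hS hT hk0
    have h := pvFd_bracket ((k : Int) * T) S hS
    -- T ≤ floordiv (k*T) S, since T*S ≤ k*T when T ≤ 0 and k < S
    have h2 : T ≤ PySem.Int.floordiv ((k : Int) * T) S := by nlinarith [h.2]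
    rw [max_eq_left h1, min_eq_left (by omega), min_eq_left (by omega)]

-- B's if-advance really tracks pvT
lemma pvStep (T S : Int) (hTS : T < S) (k : Nat) (hkS : (k : Int) < S) :
    (if (pvT T S k + 1) * S ≤ (k : Int) * T then pvT T S k + 1 else pvT T S k)
      = pvT T S (k + 1) := by
  have hk0 : (0 : Int) ≤ (k : Int) := Int.natCast_nonneg k
  have hS : 0 < S := by omega
  have hcast : ((k + 1 : Nat) : Int) - 1 = (k : Int) := by push_cast; ring
  by_cases hT : 0 < T
  · -- positive teacher count: pvT k = floordiv ((k-1)*T) S and the step follows the quotient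
    have hnn := pvFd_nonneg T S (k : Int) hS hT hk0
    have hb := pvFd_bracket ((k : Int) * T) S hS
    rcases Nat.eq_zero_or_pos k with hk | hk
    · subst hk
      simp only [pvT, Nat.zero_add, if_neg (by omega : ¬ (1 : Nat) = 0), hcast]
      have h0 : PySem.Int.floordiv ((0 : Int) * T) S = 0 := by
        rw [PySem.Int.floordiv_eq_iff_of_pos hS]; constructor <;> nlinarith
      push_cast at h0 ⊢
      rw [if_neg (by nlinarith), h0]
      omega
    · have hk1 : ¬ k = 0 := by omega
      have hcast' : ((k : Int) - 1) = ((k - 1 : Nat) : Int) := by push_cast [hk]; ring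
      have hnn' := pvFd_nonneg T S ((k : Int) - 1) hS hT (by omega)
      have hb' := pvFd_bracket (((k : Int) - 1) * T) S hS
      simp only [pvT, if_neg hk1, if_neg (by omega : ¬ k + 1 = 0), hcast,
        max_eq_right hnn', max_eq_right hnn]
      set u := PySem.Int.floordiv (((k : Int) - 1) * T) S with hu
      set v := PySem.Int.floordiv ((k : Int) * T) S with hv
      -- v ∈ {u, u+1} because adding T < S to the numerator adds at most 1
      have huv : u ≤ v ∧ v ≤ u + 1 := by
        constructor <;> nlinarith [hb.1, hb.2, hb'.1, hb'.2]
      by_cases hc : (u + 1) * S ≤ (k : Int) * T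
      · rw [if_pos hc]
        have : u + 1 ≤ v := by nlinarith [hb.2]
        omega
      · rw [if_neg hc]
        replace hc : (k : Int) * T < (u + 1) * S := by omega
        have : v ≤ u := by nlinarith [hb.1]
        omega
  · -- non-positive teacher count: the index never advances, both sides are 0
    replace hT : T ≤ 0 := by omega
    have h1 : pvT T S k = 0 := by
      unfold pvT
      rcases Nat.eq_zero_or_pos k with hk | hk
      · simp [hk]
      · rw [if_neg (by omega)]
        have := pvFd_nonpos T S ((k : Int) - 1) hS hT (by omega)
        omega
    have h2 : pvT T S (k + 1) = 0 := by
      unfold pvT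
      rw [if_neg (by omega), hcast]
      have := pvFd_nonpos T S (k : Int) hS hT hk0
      omega
    rw [h1, h2, if_neg (by nlinarith)]

-- sweep invariant: after k iterations B holds A's first k entries and teacher index pvT k
lemma pvSweep (T S : Int) (hTS : T < S) :
    ∀ k : Nat, (k : Int) ≤ S →
      (PySem.List.pyRange 0 (k : Int) 1).foldl
        (fun st i =>
          let t := if (st.2 + 1) * S ≤ i * T then st.2 + 1 else st.2
          (st.1 ++ [min (T - 1) t], t))
        ([], 0)
      = ((PySem.List.pyRange 0 (k : Int) 1).map
          (fun i => min (T - 1) (PySem.Int.floordiv (i * T) S)), pvT T S k) := by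
  intro k
  induction k with
  | zero =>
    intro _
    simp [pvT, PySem.List.pyRange_one_eq_nil le_rfl]
  | succ k ih =>
    intro hk1
    have hkS : (k : Int) < S := by push_cast at hk1; omega
    have hcast : ((k + 1 : Nat) : Int) = (k : Int) + 1 := by push_cast; ring
    rw [hcast, PySem.List.pyRange_one_succ_right (by positivity),
      List.foldl_append, ih (by omega), List.map_append]
    simp only [List.foldl_cons, List.foldl_nil, List.map_cons, List.map_nil]
    rw [pvStep T S hTS k hkS]
    have hval : min (T - 1) (pvT T S (k + 1))
        = min (T - 1) (PySem.Int.floordiv ((k : Int) * T) S) := by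
      have h := pvVal T S k hkS
      unfold pvT
      rw [if_neg (by omega : ¬ k + 1 = 0),
        (by push_cast; ring : ((k + 1 : Nat) : Int) - 1 = (k : Int))]
      exact h
    rw [hval]

-- ===== VERDICT (by name: the statement is the Claim_ definition above) =====
theorem layer_mapping_spec : Claim_equal_layer_mapping := by
  intro T S _ hPre
  unfold Pre_layer_mapping at hPre
  unfold Spec_layer_mapping layer_mapping layer_mapping_alt
  rw [if_neg (by omega), if_neg (by omega)]
  by_cases hS : 0 ≤ S
  · have h := pvSweep T S hPre S.toNat (by omega)
    rw [Int.toNat_of_nonneg hS] at h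
    rw [h]
  · rw [PySem.List.pyRange_one_eq_nil (by omega)]
    simp
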